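-- pv_equiv track=rewrite | github.com/ayiman29/BRAC-CSE221-LAB-ASSIGNMENTS-SPRING-2025 | LAB 8/Again MST.py | kruskal
-- ===== SOURCE A (Python) =====
-- def make_set(n):
--     parent = list(range(n + 1))
--     rank = [1] * (n + 1)
--     return parent, rank
--
-- def find(parent, i):
--     if parent[i] != i:
--         parent[i] = find(parent, parent[i])
--     return parent[i]
--
-- def union(parent, rank, x, y):
--     s1 = find(parent, x)
--     s2 = find(parent, y)
--     if s1 != s2:
--         if rank[s1] < rank[s2]:
--             parent[s1] = s2
--         elif rank[s1] > rank[s2]: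
--             parent[s2] = s1
--         else:
--             parent[s2] = s1
--             rank[s1] += 1
--         return True
--     return False
--
-- def kruskal(n, edges, include_edge=None, exclude_edge=None):
--     parent, rank = make_set(n)
--     total_cost = 0
--     edges_used = []
--
--     if include_edge is not None:
--         u, v, w = include_edge
--         if find(parent, u) != find(parent, v):
--             union(parent, rank, u, v)
--             total_cost += w
--             edges_used.append((u, v, w))
--
--     for edge in edges:
--         u, v, w = edge
--         if exclude_edge is not None and (u, v, w) == exclude_edge:
--             continue
--         if exclude_edge is not None and (v, u, w) == exclude_edge:
--             continue
--         if find(parent, u) != find(parent, v):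
--             union(parent, rank, u, v)
--             total_cost += w
--             edges_used.append((u, v, w))
--
--     root = find(parent, 1)
--     for i in range(2, n + 1):
--         if find(parent, i) != root:
--             return None, None
--     return total_cost, edges_used
--
-- edges = []
-- ===== SOURCE B (Python) =====
-- def kruskal(n, edges, include_edge=None, exclude_edge=None):
--     # component-label array instead of union-find: merging relabels one class
--     comp = list(range(n + 1))
--
--     def merge(u, v):
--         cu, cv = comp[u], comp[v]
--         if cu == cv:
--             return False
--         comp[:] = [cu if c == cv else c for c in comp]
--         return True
--
--     total_cost = 0
--     edges_used = []
--
--     if include_edge is not None: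
--         u, v, w = include_edge
--         if merge(u, v):
--             total_cost += w
--             edges_used.append((u, v, w))
--
--     for u, v, w in edges:
--         if exclude_edge is not None and ((u, v, w) == exclude_edge or (v, u, w) == exclude_edge):
--             continue
--         if merge(u, v):
--             total_cost += w
--             edges_used.append((u, v, w))
--
--     if any(comp[i] != comp[1] for i in range(2, n + 1)):
--         return None, None
--     return total_cost, edges_used
-- ===== Notes on version B (the rewrite author's own statement) =====
-- stated objective: simpler
-- what changed: Replaced the recursive union-find (path compression + rank arrays) by a single flat component-label array that is relabelled wholesale on each merge, so connectivity is a plain label comparison and the rank/parent machinery disappears.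
import Mathlib
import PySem

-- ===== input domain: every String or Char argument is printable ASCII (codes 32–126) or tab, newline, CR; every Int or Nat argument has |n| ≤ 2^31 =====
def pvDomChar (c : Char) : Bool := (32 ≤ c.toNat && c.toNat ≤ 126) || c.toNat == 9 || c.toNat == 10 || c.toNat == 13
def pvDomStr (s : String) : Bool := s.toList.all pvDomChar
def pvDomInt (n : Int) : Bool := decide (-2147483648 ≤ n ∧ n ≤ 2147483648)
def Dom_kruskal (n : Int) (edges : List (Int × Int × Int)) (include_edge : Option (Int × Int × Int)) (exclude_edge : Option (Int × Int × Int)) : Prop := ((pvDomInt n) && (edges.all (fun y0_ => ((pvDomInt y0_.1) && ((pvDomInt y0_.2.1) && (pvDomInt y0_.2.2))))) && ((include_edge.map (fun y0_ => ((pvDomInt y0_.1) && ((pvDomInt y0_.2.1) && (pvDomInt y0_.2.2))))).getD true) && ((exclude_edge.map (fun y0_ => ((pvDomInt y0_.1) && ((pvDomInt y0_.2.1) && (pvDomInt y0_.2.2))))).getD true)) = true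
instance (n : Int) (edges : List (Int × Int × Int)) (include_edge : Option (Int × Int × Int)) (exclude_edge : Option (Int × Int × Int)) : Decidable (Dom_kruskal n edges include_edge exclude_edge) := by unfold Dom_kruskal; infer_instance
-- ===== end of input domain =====

-- B replaces A's recursive union-find (path compression + rank) by a flat component-label
-- array relabelled on each merge: same return value on Pre_, structurally different algorithm.

-- ===== PORT A =====

def pvFind : Nat → List Int → Int → List Int × Int
  | 0, parent, i => (parent, PySem.List.pyGetD parent i 0)
  | fuel+1, parent, i =>
    if PySem.List.pyGetD parent i 0 ≠ i then
      let res := pvFind fuel parent (PySem.List.pyGetD parent i 0)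
      (PySem.List.pySetD res.1 i res.2, res.2)
    else (parent, PySem.List.pyGetD parent i 0)

def pvUnion (parent rank : List Int) (x y : Int) : List Int × List Int × Bool :=
  let f1 := pvFind parent.length parent x
  let f2 := pvFind f1.1.length f1.1 y
  let s1 := f1.2
  let s2 := f2.2
  if s1 ≠ s2 then
    if PySem.List.pyGetD rank s1 0 < PySem.List.pyGetD rank s2 0 then
      (PySem.List.pySetD f2.1 s1 s2, rank, true)
    else if PySem.List.pyGetD rank s2 0 < PySem.List.pyGetD rank s1 0 then
      (PySem.List.pySetD f2.1 s2 s1, rank, true)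
    else
      (PySem.List.pySetD f2.1 s2 s1,
       PySem.List.pySetD rank s1 (PySem.List.pyGetD rank s1 0 + 1), true)
  else (f2.1, rank, false)

def pvAccA (st : List Int × List Int × Int × List (Int × Int × Int)) (u v w : Int) :
    List Int × List Int × Int × List (Int × Int × Int) :=
  let f1 := pvFind st.1.length st.1 u
  let f2 := pvFind f1.1.length f1.1 v
  if f1.2 ≠ f2.2 then
    let un := pvUnion f2.1 st.2.1 u v
    (un.1, un.2.1, st.2.2.1 + w, st.2.2.2 ++ [(u, v, w)])
  else (f2.1, st.2.1, st.2.2.1, st.2.2.2)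

def pvStepA (ee : Option (Int × Int × Int)) (st : List Int × List Int × Int × List (Int × Int × Int))
    (e : Int × Int × Int) : List Int × List Int × Int × List (Int × Int × Int) :=
  if some (e.1, e.2.1, e.2.2) = ee then st
  else if some (e.2.1, e.1, e.2.2) = ee then st
  else pvAccA st e.1 e.2.1 e.2.2

def kruskal (n : Int) (edges : List (Int × Int × Int)) (include_edge : Option (Int × Int × Int)) (exclude_edge : Option (Int × Int × Int)) : Option Int × (Option (List (Int × Int × Int))) :=
  let st0 : List Int × List Int × Int × List (Int × Int × Int) :=
    (PySem.List.pyRange 0 (n+1) 1, List.replicate (n+1).toNat 1, 0, [])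
  let st1 := match include_edge with
    | none => st0
    | some t => pvAccA st0 t.1 t.2.1 t.2.2
  let st2 := edges.foldl (pvStepA exclude_edge) st1
  let fr := pvFind st2.1.length st2.1 1
  let chk := (PySem.List.pyRange 2 (n+1) 1).foldl
    (fun acc i =>
      if acc.2 then acc
      else
        let fi := pvFind acc.1.length acc.1 i
        (fi.1, decide (fi.2 ≠ fr.2)))
    (fr.1, false)
  if chk.2 then (none, none) else (some st2.2.2.1, some st2.2.2.2)

-- ===== PORT B =====
def pvMergeB (comp : List Int) (u v : Int) : List Int × Bool :=
  let cu := PySem.List.pyGetD comp u 0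
  let cv := PySem.List.pyGetD comp v 0
  if cu = cv then (comp, false)
  else (comp.map (fun c => if c = cv then cu else c), true)

def pvStepB (ee : Option (Int × Int × Int)) (st : List Int × Int × List (Int × Int × Int))
    (e : Int × Int × Int) : List Int × Int × List (Int × Int × Int) :=
  if some (e.1, e.2.1, e.2.2) = ee ∨ some (e.2.1, e.1, e.2.2) = ee then st
  else
    let mg := pvMergeB st.1 e.1 e.2.1
    if mg.2 then (mg.1, st.2.1 + e.2.2, st.2.2 ++ [(e.1, e.2.1, e.2.2)])
    else (mg.1, st.2.1, st.2.2)

def kruskal_alt (n : Int) (edges : List (Int × Int × Int)) (include_edge : Option (Int × Int × Int)) (exclude_edge : Option (Int × Int × Int)) : Option Int × (Option (List (Int × Int × Int))) :=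
  let st0 : List Int × Int × List (Int × Int × Int) := (PySem.List.pyRange 0 (n+1) 1, 0, [])
  let st1 := match include_edge with
    | none => st0
    | some t =>
      let mg := pvMergeB st0.1 t.1 t.2.1
      if mg.2 then (mg.1, t.2.2, [(t.1, t.2.1, t.2.2)]) else (mg.1, 0, [])
  let st2 := edges.foldl (pvStepB exclude_edge) st1
  if (PySem.List.pyRange 2 (n+1) 1).any
      (fun i => PySem.List.pyGetD st2.1 i 0 != PySem.List.pyGetD st2.1 1 0)
  then (none, none)
  else (some st2.2.1, some st2.2.2)


-- ===== PRECONDITION & SPEC =====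
-- Pre_kruskal holds exactly on the inputs where the Python A returns normally: n ≥ 1 and every
-- endpoint that is actually indexed (include_edge's, and each edge's unless that edge is skipped
-- by the exclude_edge test) lies in Python's list-index range [-(n+1), n]; outside it A raises
-- IndexError.
def Pre_kruskal (n : Int) (edges : List (Int × Int × Int)) (include_edge : Option (Int × Int × Int)) (exclude_edge : Option (Int × Int × Int)) : Prop :=
  1 ≤ n ∧
  (match include_edge with
   | none => True
   | some t => (-(n+1) ≤ t.1 ∧ t.1 ≤ n) ∧ (-(n+1) ≤ t.2.1 ∧ t.2.1 ≤ n)) ∧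
  (∀ e ∈ edges, some (e.1, e.2.1, e.2.2) = exclude_edge ∨ some (e.2.1, e.1, e.2.2) = exclude_edge ∨
    ((-(n+1) ≤ e.1 ∧ e.1 ≤ n) ∧ (-(n+1) ≤ e.2.1 ∧ e.2.1 ≤ n)))

instance (n : Int) (edges : List (Int × Int × Int)) (include_edge : Option (Int × Int × Int)) (exclude_edge : Option (Int × Int × Int)) : Decidable (Pre_kruskal n edges include_edge exclude_edge) := by
  unfold Pre_kruskal
  rcases include_edge with _ | t <;> infer_instance

def pvWitness_kruskal : Int × (List (Int × Int × Int)) × (Option (Int × Int × Int)) × (Option (Int × Int × Int)) :=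
  (3, [(1, 2, 5), (2, 3, 7)], none, none)

def Spec_kruskal (n : Int) (edges : List (Int × Int × Int)) (include_edge : Option (Int × Int × Int)) (exclude_edge : Option (Int × Int × Int)) (out : Option Int × (Option (List (Int × Int × Int)))) : Prop := out = kruskal_alt n edges include_edge exclude_edge
instance (n : Int) (edges : List (Int × Int × Int)) (include_edge : Option (Int × Int × Int)) (exclude_edge : Option (Int × Int × Int)) (out : Option Int × (Option (List (Int × Int × Int)))) : Decidable (Spec_kruskal n edges include_edge exclude_edge out) := by unfold Spec_kruskal; infer_instance

-- ===== CLAIM (what is proved, stated in full; the proofs are below) =====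
def Claim_equal_kruskal : Prop := ∀ (n : Int) (edges : List (Int × Int × Int)) (include_edge : Option (Int × Int × Int)) (exclude_edge : Option (Int × Int × Int)), Dom_kruskal n edges include_edge exclude_edge → Pre_kruskal n edges include_edge exclude_edge → Spec_kruskal n edges include_edge exclude_edge (kruskal n edges include_edge exclude_edge)

-- ===== LEMMAS AND PROOFS =====

def pvNrm (L : Nat) (x : Int) : Nat := if 0 ≤ x then x.toNat else L - (-x).toNat

def pvAt (p : List Int) (k : Nat) : Int := p.getD k 0

def pvStep (p : List Int) (k : Nat) : Nat := (pvAt p k).toNat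

def pvChase : Nat → List Int → Nat → Option Nat
  | 0, _, _ => none
  | f+1, p, k => if pvAt p k = (k:Int) then some k else pvChase f p (pvStep p k)

def pvIter : Nat → List Int → Nat → Nat
  | 0, _, k => k
  | t+1, p, k => pvIter t p (pvStep p k)

def pvRoot (p : List Int) (k r : Nat) : Prop := ∃ f, pvChase f p k = some r

def pvRange (m : Nat) (p : List Int) : Prop :=
  ∀ k, k < m → 0 ≤ pvAt p k ∧ pvAt p k < (m:Int)

def pvPres (m : Nat) (p p' : List Int) : Prop :=
  ∀ j r, j < m → pvRoot p j r → pvRoot p' j r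

theorem pvNrm_lt (L : Nat) (x : Int) (h1 : -(L:Int) ≤ x) (h2 : x < L) : pvNrm L x < L := by
  unfold pvNrm; split <;> omega

theorem pvIdx_eq (L : Nat) (x : Int) (h1 : -(L:Int) ≤ x) (h2 : x < L) :
    PySem.List.pyIdx? L x = some (pvNrm L x) := by
  unfold PySem.List.pyIdx? pvNrm
  split_ifs <;> rfl

theorem pyGetD_nrm (xs : List Int) (x : Int) (d : Int) (h1 : -(xs.length:Int) ≤ x) (h2 : x < xs.length) :
    PySem.List.pyGetD xs x d = xs.getD (pvNrm xs.length x) d := by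
  simp [PySem.List.pyGetD, PySem.List.pyGet?, pvIdx_eq xs.length x h1 h2, List.getD_eq_getElem?_getD]

theorem pySetD_nrm (xs : List Int) (x : Int) (v : Int) (h1 : -(xs.length:Int) ≤ x) (h2 : x < xs.length) :
    PySem.List.pySetD xs x v = xs.set (pvNrm xs.length x) v := by
  simp [PySem.List.pySetD, PySem.List.pySet?, pvIdx_eq xs.length x h1 h2]

theorem pvChase_succ (f : Nat) (p : List Int) (k r : Nat) (h : pvChase f p k = some r) :
    pvChase (f+1) p k = some r := by
  induction f generalizing k with
  | zero => simp [pvChase] at h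
  | succ f ih =>
    rw [pvChase] at h ⊢
    split at h
    · rw [if_pos ‹_›]; exact h
    · rw [if_neg ‹_›]; exact ih _ h

theorem pvChase_mono (f f' : Nat) (p : List Int) (k r : Nat) (hle : f ≤ f')
    (h : pvChase f p k = some r) : pvChase f' p k = some r := by
  induction f' with
  | zero =>
    have : f = 0 := by omega
    subst this; exact h
  | succ f' ih =>
    rcases Nat.lt_or_ge f (f'+1) with hf | hf
    · exact pvChase_succ _ _ _ _ (ih (by omega))
    · have : f = f' + 1 := by omega
      subst this; exact h

theorem pvChase_isRoot (f : Nat) (p : List Int) (k r : Nat) (h : pvChase f p k = some r) :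
    pvAt p r = (r:Int) := by
  induction f generalizing k with
  | zero => simp [pvChase] at h
  | succ f ih =>
    rw [pvChase] at h
    split at h
    · cases h; assumption
    · exact ih _ h

theorem pvRoot_det (p : List Int) (k r r' : Nat) (h : pvRoot p k r) (h' : pvRoot p k r') : r = r' := by
  obtain ⟨f, hf⟩ := h; obtain ⟨g, hg⟩ := h'
  have h1 := pvChase_mono f (max f g) p k r (le_max_left _ _) hf
  have h2 := pvChase_mono g (max f g) p k r' (le_max_right _ _) hg
  rw [h1] at h2; exact (Option.some_inj.mp h2)

theorem pvRoot_self (p : List Int) (k : Nat) (h : pvAt p k = (k:Int)) : pvRoot p k k :=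
  ⟨1, by rw [pvChase, if_pos h]⟩

theorem pvRoot_isRoot (p : List Int) (k r : Nat) (h : pvRoot p k r) : pvAt p r = (r:Int) := by
  obtain ⟨f, hf⟩ := h; exact pvChase_isRoot f p k r hf

theorem pvRoot_root_self (p : List Int) (k r : Nat) (h : pvRoot p k r) : pvRoot p r r :=
  pvRoot_self p r (pvRoot_isRoot p k r h)

theorem pvIter_succ_right (t : Nat) (p : List Int) (k : Nat) :
    pvIter (t+1) p k = pvStep p (pvIter t p k) := by
  induction t generalizing k with
  | zero => rfl
  | succ t ih => rw [pvIter, ih, pvIter]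

theorem pvIter_add (a b : Nat) (p : List Int) (k : Nat) :
    pvIter (a+b) p k = pvIter b p (pvIter a p k) := by
  induction b with
  | zero => rfl
  | succ b ih => rw [← Nat.add_assoc, pvIter_succ_right, ih, pvIter_succ_right]

theorem pvIter_fix (t : Nat) (p : List Int) (k : Nat) (h : pvAt p k = (k:Int)) :
    pvIter t p k = k := by
  induction t with
  | zero => rfl
  | succ t ih => rw [pvIter_succ_right, ih, pvStep, h]; simp

theorem pvIter_lt (m : Nat) (p : List Int) (hr : pvRange m p) (t k : Nat) (hk : k < m) :
    pvIter t p k < m := by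
  induction t generalizing k with
  | zero => exact hk
  | succ t ih =>
    rw [pvIter]
    exact ih _ (by have := hr k hk; unfold pvStep; omega)

theorem pvChase_to_iter (f : Nat) (p : List Int) (k r : Nat) (h : pvChase f p k = some r) :
    ∃ t, t < f ∧ pvIter t p k = r := by
  induction f generalizing k with
  | zero => simp [pvChase] at h
  | succ f ih =>
    rw [pvChase] at h
    split at h
    · exact ⟨0, by omega, by cases h; rfl⟩
    · obtain ⟨t, ht, hit⟩ := ih _ h
      exact ⟨t+1, by omega, by rw [pvIter]; exact hit⟩

theorem pvIter_to_chase (t : Nat) (p : List Int) (k r : Nat) (hit : pvIter t p k = r)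
    (hroot : pvAt p r = (r:Int)) : pvChase (t+1) p k = some r := by
  induction t generalizing k with
  | zero =>
    rw [pvIter] at hit; subst hit
    rw [pvChase, if_pos hroot]
  | succ t ih =>
    by_cases hk : pvAt p k = (k:Int)
    · have hfix : pvIter (t+1) p k = k := pvIter_fix _ _ _ hk
      rw [hfix] at hit; subst hit
      rw [pvChase, if_pos hk]
    · rw [pvChase, if_neg hk]
      exact ih _ (by rw [pvIter] at hit; exact hit)

-- minimal path, fuel bounds, set-preservation
theorem pvMinPath (m : Nat) (p : List Int) (k r : Nat) (hr : pvRange m p) (hk : k < m)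
    (hR : pvRoot p k r) :
    ∃ t, pvIter t p k = r ∧ t + 1 ≤ m ∧
      (∀ s, s < t → pvAt p (pvIter s p k) ≠ (pvIter s p k : Int)) ∧
      (∀ i j, i < j → j ≤ t → pvIter i p k ≠ pvIter j p k) := by
  obtain ⟨f, hf⟩ := hR
  obtain ⟨t1, ht1, hit1⟩ := pvChase_to_iter f p k r hf
  have hex : ∃ t, pvAt p (pvIter t p k) = (pvIter t p k : Int) :=
    ⟨t1, by rw [hit1]; exact pvChase_isRoot f p k r hf⟩
  classical
  let t := Nat.find hex
  have htroot : pvAt p (pvIter t p k) = (pvIter t p k : Int) := Nat.find_spec hex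
  have htmin : ∀ s, s < t → pvAt p (pvIter s p k) ≠ (pvIter s p k : Int) :=
    fun s hs => Nat.find_min hex hs
  have hdist : ∀ i j, i < j → j ≤ t → pvIter i p k ≠ pvIter j p k := by
    intro i j hij hjt heq
    have hper : ∀ s, pvIter (i + s) p k = pvIter (j + s) p k := by
      intro s; rw [pvIter_add, pvIter_add, heq]
    have h1 : pvIter (i + (t - j)) p k = pvIter t p k := by
      rw [hper (t - j)]; congr 1; omega
    have hlt : i + (t - j) < t := by omega
    exact htmin _ hlt (by rw [h1]; exact htroot)
  have htr : pvIter t p k = r := by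
    have hRt : pvRoot p k (pvIter t p k) := ⟨t + 1, pvIter_to_chase t p k _ rfl htroot⟩
    exact pvRoot_det p k _ r hRt ⟨f, hf⟩
  have hbound : t + 1 ≤ m := by
    have hinj : Set.InjOn (fun s => pvIter s p k) (Finset.range (t+1)) := by
      intro i hi j hj hij
      simp only [Finset.coe_range, Set.mem_Iio] at hi hj
      by_contra hne
      rcases Nat.lt_or_ge i j with h | h
      · exact hdist i j h (by omega) hij
      · exact hdist j i (by omega) (by omega) hij.symm
    have hmaps : ∀ s ∈ Finset.range (t+1), (fun s => pvIter s p k) s ∈ Finset.range m := by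
      intro s _; simp only [Finset.mem_range]; exact pvIter_lt m p hr s k hk
    have := Finset.card_le_card_of_injOn _ hmaps hinj
    simpa using this
  exact ⟨t, htr, hbound, htmin, hdist⟩

theorem pvChase_full (m : Nat) (p : List Int) (k r : Nat) (hr : pvRange m p) (hk : k < m)
    (hR : pvRoot p k r) : pvChase m p k = some r := by
  obtain ⟨t, htr, hb, _, _⟩ := pvMinPath m p k r hr hk hR
  exact pvChase_mono (t+1) m p k r hb
    (pvIter_to_chase t p k r htr (pvRoot_isRoot p k r hR))

theorem pvChase_step_full (m : Nat) (p : List Int) (k r : Nat) (hr : pvRange m p) (hk : k < m)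
    (hne : pvAt p k ≠ (k:Int)) (hR : pvRoot p k r) :
    pvChase (m-1) p (pvStep p k) = some r := by
  obtain ⟨t, htr, hb, hmin, _⟩ := pvMinPath m p k r hr hk hR
  have ht1 : 1 ≤ t := by
    rcases Nat.eq_zero_or_pos t with h | h
    · exfalso
      subst h
      have hkr : k = r := htr
      subst hkr
      exact hne (pvRoot_isRoot p k k hR)
    · exact h
  have hit : pvIter (t-1) p (pvStep p k) = r := by
    have : pvIter ((t-1)+1) p k = r := by rw [show (t-1)+1 = t by omega]; exact htr
    rw [pvIter] at this; exact this
  have := pvIter_to_chase (t-1) p (pvStep p k) r hit (pvRoot_isRoot p k r hR)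
  exact pvChase_mono _ _ p _ r (by omega) this

theorem pvAt_set_ne (p : List Int) (a : Nat) (b : Int) (x : Nat) (hx : x ≠ a) :
    pvAt (p.set a b) x = pvAt p x := by
  unfold pvAt
  rw [List.getD_eq_getElem?_getD, List.getD_eq_getElem?_getD, List.getElem?_set_ne (by omega)]

theorem pvAt_set_self (p : List Int) (a : Nat) (b : Int) (ha : a < p.length) :
    pvAt (p.set a b) a = b := by
  unfold pvAt
  rw [List.getD_eq_getElem?_getD, List.getElem?_set_self ha]; rfl

theorem pvChase_ext (p q : List Int) (h : ∀ x, pvAt p x = pvAt q x) (f : Nat) (k : Nat) :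
    pvChase f p k = pvChase f q k := by
  induction f generalizing k with
  | zero => rfl
  | succ f ih => rw [pvChase, pvChase, h k, pvStep, pvStep, h k, ih]

theorem pvIter_set_agree (p : List Int) (a : Nat) (b : Int) (k t : Nat)
    (h : ∀ s, s < t → pvIter s p k ≠ a) :
    ∀ s, s ≤ t → pvIter s (p.set a b) k = pvIter s p k := by
  intro s hs
  induction s with
  | zero => rfl
  | succ s ih =>
    rw [pvIter_succ_right, pvIter_succ_right, ih (by omega)]
    unfold pvStep
    rw [pvAt_set_ne p a b _ (h s (by omega))]

-- root preservation under path-compression writes and root links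
theorem pvRange_set (m : Nat) (p : List Int) (a : Nat) (b : Int) (hr : pvRange m p)
    (hlen : p.length = m) (hb0 : 0 ≤ b) (hbm : b < (m:Int)) : pvRange m (p.set a b) := by
  intro k hk
  by_cases hka : k = a
  · subst hka
    rw [pvAt_set_self p k b (by omega)]
    exact ⟨hb0, hbm⟩
  · rw [pvAt_set_ne p a b k hka]; exact hr k hk

-- i < m, r is the root of i in p: writing p[i] := r preserves every root
theorem pvSet_root_pres (m : Nat) (p : List Int) (i r : Nat) (hlen : p.length = m)
    (hr : pvRange m p) (hi : i < m) (hR : pvRoot p i r) :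
    pvPres m p (p.set i (r:Int)) := by
  intro j s hj hRj
  by_cases hroot : pvAt p i = (i:Int)
  · -- i is already a root: r = i and the write is value-preserving
    have hri : r = i := pvRoot_det p i r i hR (pvRoot_self p i hroot)
    have hext : ∀ x, pvAt (p.set i (r:Int)) x = pvAt p x := by
      intro x
      by_cases hx : x = i
      · subst hx; rw [pvAt_set_self p x (r:Int) (by omega), hroot, hri]
      · exact pvAt_set_ne p i (r:Int) x hx
    obtain ⟨f, hf⟩ := hRj
    exact ⟨f, by rw [pvChase_ext _ p hext]; exact hf⟩
  · -- i is not a root, so r ≠ i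
    have hrne : r ≠ i := by
      intro h; exact hroot (h ▸ pvRoot_isRoot p i r hR)
    obtain ⟨t, htr, _, hmin, hdist⟩ := pvMinPath m p j s hr hj hRj
    by_cases hon : ∃ s0, s0 ≤ t ∧ pvIter s0 p j = i
    · obtain ⟨s0, hs0t, hs0⟩ := hon
      have hs0lt : s0 < t := by
        rcases Nat.lt_or_ge s0 t with h | h
        · exact h
        · exfalso
          have : s0 = t := by omega
          subst this
          rw [hs0] at htr; subst htr
          exact hroot (pvRoot_isRoot p j i hRj)
      -- s = r : the root of j is the root of i
      have hsr : s = r := by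
        have h1 : pvIter (t - s0) p i = s := by
          rw [← hs0, ← pvIter_add]
          rw [show s0 + (t - s0) = t by omega]; exact htr
        have : pvRoot p i s := ⟨t - s0 + 1, pvIter_to_chase _ p i s h1 (pvRoot_isRoot p j s hRj)⟩
        exact pvRoot_det p i s r this hR
      rw [hsr] at htr ⊢
      -- path before s0 avoids i
      have havoid : ∀ u, u < s0 → pvIter u p j ≠ i := by
        intro u hu heq
        exact hdist u s0 hu (by omega) (by rw [heq, hs0])
      have hagree : pvIter s0 (p.set i ↑r) j = i := by
        rw [pvIter_set_agree p i ↑r j s0 havoid s0 le_rfl]; exact hs0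
      have hstep : pvIter (s0+1) (p.set i ↑r) j = r := by
        rw [pvIter_succ_right, hagree, pvStep, pvAt_set_self p i ↑r (by omega)]
        simp
      have hrootp' : pvAt (p.set i ↑r) r = (r:Int) := by
        rw [pvAt_set_ne p i ↑r r hrne]
        exact pvRoot_isRoot p i r hR
      exact ⟨s0 + 2, pvIter_to_chase (s0+1) _ j r hstep hrootp'⟩
    · simp only [not_exists, not_and] at hon
      have havoid : ∀ u, u < t → pvIter u p j ≠ i := fun u hu => hon u (by omega)
      have hagree : pvIter t (p.set i ↑r) j = s := by
        rw [pvIter_set_agree p i ↑r j t havoid t le_rfl]; exact htr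
      have hsne : s ≠ i := by
        intro h; subst h
        rw [htr] at *
        exact hroot (pvRoot_isRoot p j s hRj)
      have hrootp' : pvAt (p.set i ↑r) s = (s:Int) := by
        rw [pvAt_set_ne p i ↑r s hsne]
        exact pvRoot_isRoot p j s hRj
      exact ⟨t + 1, pvIter_to_chase t _ j s hagree hrootp'⟩

-- a b roots, a ≠ b: writing p[a] := b maps root a to b, fixes other roots
theorem pvLink_root (m : Nat) (p : List Int) (a b : Nat) (hlen : p.length = m)
    (hr : pvRange m p) (ha : a < m) (hb : b < m) (hra : pvAt p a = (a:Int))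
    (hrb : pvAt p b = (b:Int)) (hab : a ≠ b) :
    ∀ j s, j < m → pvRoot p j s → pvRoot (p.set a (b:Int)) j (if s = a then b else s) := by
  intro j s hj hRj
  obtain ⟨t, htr, _, hmin, hdist⟩ := pvMinPath m p j s hr hj hRj
  by_cases hsa : s = a
  · subst hsa
    rw [if_pos rfl]
    have havoid : ∀ u, u < t → pvIter u p j ≠ s := by
      intro u hu heq
      exact hmin u hu (by rw [heq]; exact hra)
    have hagree : pvIter t (p.set s ↑b) j = s := by
      rw [pvIter_set_agree p s ↑b j t havoid t le_rfl]; exact htr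
    have hstep : pvIter (t+1) (p.set s ↑b) j = b := by
      rw [pvIter_succ_right, hagree, pvStep, pvAt_set_self p s ↑b (by omega)]
      simp
    have hrootp' : pvAt (p.set s ↑b) b = (b:Int) := by
      rw [pvAt_set_ne p s ↑b b (by omega)]; exact hrb
    exact ⟨t + 2, pvIter_to_chase (t+1) _ j b hstep hrootp'⟩
  · rw [if_neg hsa]
    have havoid : ∀ u, u < t → pvIter u p j ≠ a := by
      intro u hu heq
      exact hmin u hu (by rw [heq]; exact hra)
    have havoid' : ∀ u, u ≤ t → pvIter u p j ≠ a := by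
      intro u hu
      rcases Nat.lt_or_ge u t with h | h
      · exact havoid u h
      · have : u = t := by omega
        subst this
        rw [htr]; exact hsa
    have hagree : pvIter t (p.set a ↑b) j = s := by
      rw [pvIter_set_agree p a ↑b j t havoid t le_rfl]; exact htr
    have hrootp' : pvAt (p.set a ↑b) s = (s:Int) := by
      rw [pvAt_set_ne p a ↑b s hsa]; exact pvRoot_isRoot p j s hRj
    exact ⟨t + 1, pvIter_to_chase t _ j s hagree hrootp'⟩

def pvInRm (m : Nat) (x : Int) : Prop := -(m:Int) ≤ x ∧ x < (m:Int)

theorem pvNrm_nonneg_eq (m : Nat) (x : Int) (h : 0 ≤ x) : ((pvNrm m x : Nat) : Int) = x := by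
  unfold pvNrm; rw [if_pos h]; omega

-- find on a nonnegative (canonical) index
theorem pvFind_spec_nat (m : Nat) (f : Nat) :
    ∀ (p : List Int) (k r : Nat), p.length = m → pvRange m p → k < m →
    pvChase f p k = some r →
    ∃ p', pvFind f p (k:Int) = (p', (r:Int)) ∧ p'.length = m ∧ pvRange m p' ∧ pvPres m p p' := by
  induction f with
  | zero => intro p k r _ _ _ h; simp [pvChase] at h
  | succ f ih =>
    intro p k r hlen hr hk hch
    have hget : PySem.List.pyGetD p (k:Int) 0 = pvAt p k := by
      rw [PySem.List.pyGetD_natCast]; rfl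
    rw [pvChase] at hch
    by_cases hroot : pvAt p k = (k:Int)
    · rw [if_pos hroot] at hch
      have hkr : k = r := Option.some_inj.mp hch
      subst hkr
      refine ⟨p, ?_, hlen, hr, fun j s _ h => h⟩
      rw [pvFind, hget, if_neg (by simp [hroot])]
      rw [hroot]
    · rw [if_neg hroot] at hch
      have hifc : PySem.List.pyGetD p (k:Int) 0 ≠ (k:Int) := by rw [hget]; exact_mod_cast hroot
      have hstep_lt : pvStep p k < m := by have := hr k hk; unfold pvStep; omega
      have hcast : ((pvStep p k : Nat) : Int) = pvAt p k := by
        have := hr k hk; unfold pvStep; omega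
      obtain ⟨p1, hfind1, hlen1, hr1, hpres1⟩ := ih p (pvStep p k) r hlen hr hstep_lt hch
      have hR : pvRoot p k r := ⟨f+1, by rw [pvChase, if_neg hroot]; exact hch⟩
      have hR1 : pvRoot p1 k r := hpres1 k r hk hR
      have hrm : r < m := by
        obtain ⟨t, htr, _, _, _⟩ := pvMinPath m p k r hr hk hR
        rw [← htr]; exact pvIter_lt m p hr t k hk
      refine ⟨p1.set k (r:Int), ?_, by simp [hlen1], ?_, ?_⟩
      · rw [pvFind, if_pos hifc]
        rw [hget, hcast] at *
        rw [hfind1]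
        simp only []
        rw [PySem.List.pySetD_natCast]
      · exact pvRange_set m p1 k (r:Int) hr1 hlen1 (by omega) (by omega)
      · intro j s hj hRj
        exact pvSet_root_pres m p1 k r hlen1 hr1 hk hR1 j s hj (hpres1 j s hj hRj)

-- find on a raw (possibly negative) in-range index, fuel m
theorem pvFind_spec (m : Nat) (p : List Int) (x : Int) (r : Nat) (hlen : p.length = m)
    (hr : pvRange m p) (hm : 2 ≤ m) (hx : pvInRm m x) (hR : pvRoot p (pvNrm m x) r) :
    ∃ p', pvFind m p x = (p', (r:Int)) ∧ p'.length = m ∧ pvRange m p' ∧ pvPres m p p' := by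
  set k := pvNrm m x with hkdef
  obtain ⟨hx1, hx2⟩ := hx
  have hkm : k < m := pvNrm_lt m x hx1 hx2
  by_cases hpos : 0 ≤ x
  · have hxk : ((k:Nat):Int) = x := pvNrm_nonneg_eq m x hpos
    rw [← hxk]
    exact pvFind_spec_nat m m p k r hlen hr hkm (pvChase_full m p k r hr hkm hR)
  · have hneg : x < 0 := by omega
    obtain ⟨f, hf⟩ : ∃ f, m = f + 1 := ⟨m - 1, by omega⟩
    have hget : PySem.List.pyGetD p x 0 = pvAt p k := by
      rw [pyGetD_nrm p x 0 (by omega) (by omega), hlen]; rfl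
    have hne : pvAt p k ≠ x := by have := hr k hkm; omega
    have hset : ∀ q : List Int, q.length = m → PySem.List.pySetD q x (r:Int) = q.set k (r:Int) := by
      intro q hq
      rw [pySetD_nrm q x _ (by omega) (by omega), hq]
    by_cases hroot : pvAt p k = (k:Int)
    · have hkr : k = r := pvRoot_det p k k r (pvRoot_self p k hroot) hR
      have hch : pvChase f p k = some r := by
        cases f with
        | zero => omega
        | succ g => rw [pvChase, if_pos hroot, hkr]
      obtain ⟨p1, hfind1, hlen1, hr1, hpres1⟩ := pvFind_spec_nat m f p k r hlen hr hkm hch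
      refine ⟨p1.set k (r:Int), ?_, by simp [hlen1], ?_, ?_⟩
      · have hifc : PySem.List.pyGetD p x 0 ≠ x := by rw [hget]; exact hne
        rw [hf, pvFind, if_pos hifc]
        rw [hget, show pvAt p k = ((k:Nat):Int) from hroot, hfind1]
        simp only []
        rw [hset p1 hlen1]
      · exact pvRange_set m p1 k (r:Int) hr1 hlen1 (by omega) (by omega)
      · intro j s hj hRj
        have hR1 : pvRoot p1 k r := hpres1 k r hkm (hkr ▸ pvRoot_self p k hroot)
        exact pvSet_root_pres m p1 k r hlen1 hr1 hkm hR1 j s hj (hpres1 j s hj hRj)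
    · have hch : pvChase f p (pvStep p k) = some r := by
        have := pvChase_step_full m p k r hr hkm hroot hR
        rw [hf] at this; simpa using this
      have hstep_lt : pvStep p k < m := by have := hr k hkm; unfold pvStep; omega
      have hcast : ((pvStep p k : Nat) : Int) = pvAt p k := by
        have := hr k hkm; unfold pvStep; omega
      obtain ⟨p1, hfind1, hlen1, hr1, hpres1⟩ := pvFind_spec_nat m f p (pvStep p k) r hlen hr hstep_lt hch
      have hR1 : pvRoot p1 k r := hpres1 k r hkm hR
      have hrm : r < m := by
        obtain ⟨t, htr, _, _, _⟩ := pvMinPath m p k r hr hkm hR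
        rw [← htr]; exact pvIter_lt m p hr t k hkm
      refine ⟨p1.set k (r:Int), ?_, by simp [hlen1], ?_, ?_⟩
      · have hifc : PySem.List.pyGetD p x 0 ≠ x := by rw [hget]; exact hne
        rw [hf, pvFind, if_pos hifc]
        rw [hget, hcast] at *
        rw [hfind1]
        simp only []
        rw [hset p1 hlen1]
      · exact pvRange_set m p1 k (r:Int) hr1 hlen1 (by omega) (by omega)
      · intro j s hj hRj
        exact pvSet_root_pres m p1 k r hlen1 hr1 hkm hR1 j s hj (hpres1 j s hj hRj)

theorem pvRoot_lt (m : Nat) (p : List Int) (k r : Nat) (hr : pvRange m p) (hk : k < m)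
    (hR : pvRoot p k r) : r < m := by
  obtain ⟨t, htr, _, _, _⟩ := pvMinPath m p k r hr hk hR
  rw [← htr]; exact pvIter_lt m p hr t k hk

theorem pvUnion_spec (m : Nat) (p rk : List Int) (x y : Int) (rx ry : Nat)
    (hlen : p.length = m) (hr : pvRange m p) (hm : 2 ≤ m)
    (hx : pvInRm m x) (hy : pvInRm m y)
    (hRx : pvRoot p (pvNrm m x) rx) (hRy : pvRoot p (pvNrm m y) ry) :
    ∃ p', (pvUnion p rk x y).1 = p' ∧ p'.length = m ∧ pvRange m p' ∧
      ((rx = ry ∧ pvPres m p p') ∨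
       (rx ≠ ry ∧ ∃ c d : Nat, ((c, d) = (rx, ry) ∨ (c, d) = (ry, rx)) ∧
         ∀ j s, j < m → pvRoot p j s → pvRoot p' j (if s = c then d else s))) := by
  obtain ⟨p1, hf1, hlen1, hr1, hpres1⟩ := pvFind_spec m p x rx hlen hr hm hx hRx
  have hRy1 : pvRoot p1 (pvNrm m y) ry := hpres1 _ _ (pvNrm_lt m y hy.1 hy.2) hRy
  obtain ⟨p2, hf2, hlen2, hr2, hpres2⟩ := pvFind_spec m p1 y ry hlen1 hr1 hm hy hRy1
  have hpres12 : pvPres m p p2 := fun j s hj h => hpres2 j s hj (hpres1 j s hj h)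
  have hrxm : rx < m := pvRoot_lt m p _ rx hr (pvNrm_lt m x hx.1 hx.2) hRx
  have hrym : ry < m := pvRoot_lt m p _ ry hr (pvNrm_lt m y hy.1 hy.2) hRy
  have hrootx2 : pvAt p2 rx = (rx:Int) :=
    pvRoot_isRoot p2 rx rx (hpres12 rx rx hrxm (pvRoot_root_self p _ rx hRx))
  have hrooty2 : pvAt p2 ry = (ry:Int) :=
    pvRoot_isRoot p2 ry ry (hpres12 ry ry hrym (pvRoot_root_self p _ ry hRy))
  unfold pvUnion
  rw [hlen, hf1]
  simp only []
  rw [hlen1, hf2]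
  simp only []
  by_cases hrr : rx = ry
  · rw [if_neg (by simp [hrr])]
    exact ⟨p2, rfl, hlen2, hr2, Or.inl ⟨hrr, hpres12⟩⟩
  · rw [if_pos (by simpa using fun h => hrr (by exact_mod_cast h))]
    have hlink : ∀ (a b : Nat), a = rx ∧ b = ry ∨ a = ry ∧ b = rx →
        ∃ p', p2.set a (b:Int) = p' ∧ p'.length = m ∧ pvRange m p' ∧
          ∀ j s, j < m → pvRoot p j s → pvRoot p' j (if s = a then b else s) := by
      rintro a b (⟨ha, hb⟩ | ⟨ha, hb⟩) <;> rw [ha, hb]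
      · exact ⟨p2.set rx (ry:Int), rfl, by simp [hlen2], pvRange_set m p2 rx _ hr2 hlen2 (by omega) (by omega),
          fun j s hj hRj => pvLink_root m p2 rx ry hlen2 hr2 hrxm hrym hrootx2 hrooty2 hrr j s hj (hpres12 j s hj hRj)⟩
      · exact ⟨p2.set ry (rx:Int), rfl, by simp [hlen2], pvRange_set m p2 ry _ hr2 hlen2 (by omega) (by omega),
          fun j s hj hRj => pvLink_root m p2 ry rx hlen2 hr2 hrym hrxm hrooty2 hrootx2 (fun h => hrr h.symm) j s hj (hpres12 j s hj hRj)⟩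
    split_ifs with h1 h2
    · obtain ⟨p', he, h3, h4, h5⟩ := hlink rx ry (Or.inl ⟨rfl, rfl⟩)
      refine ⟨p', ?_, h3, h4, Or.inr ⟨hrr, rx, ry, Or.inl rfl, h5⟩⟩
      simp only [PySem.List.pySetD_natCast] at *
      exact he
    · obtain ⟨p', he, h3, h4, h5⟩ := hlink ry rx (Or.inr ⟨rfl, rfl⟩)
      refine ⟨p', ?_, h3, h4, Or.inr ⟨hrr, ry, rx, Or.inr rfl, h5⟩⟩
      simp only [PySem.List.pySetD_natCast] at *
      exact he
    · obtain ⟨p', he, h3, h4, h5⟩ := hlink ry rx (Or.inr ⟨rfl, rfl⟩)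
      refine ⟨p', ?_, h3, h4, Or.inr ⟨hrr, ry, rx, Or.inr rfl, h5⟩⟩
      simp only [PySem.List.pySetD_natCast] at *
      exact he

def pvINV (m : Nat) (p comp : List Int) : Prop :=
  p.length = m ∧ pvRange m p ∧ (∀ k, k < m → ∃ r, pvRoot p k r) ∧ comp.length = m ∧
  (∀ j k, j < m → k < m → ((∃ r, pvRoot p j r ∧ pvRoot p k r) ↔ pvAt comp j = pvAt comp k))

theorem pvINV_pres (m : Nat) (p p' comp : List Int) (hInv : pvINV m p comp)
    (hlen' : p'.length = m) (hr' : pvRange m p') (hpres : pvPres m p p') :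
    pvINV m p' comp := by
  obtain ⟨hlen, hr, hrooted, hclen, hiff⟩ := hInv
  refine ⟨hlen', hr', fun k hk => (hrooted k hk).imp (fun r h => hpres k r hk h), hclen, ?_⟩
  intro j k hj hk
  rw [← hiff j k hj hk]
  constructor
  · rintro ⟨r, hRj', hRk'⟩
    obtain ⟨rj, hRj⟩ := hrooted j hj
    obtain ⟨rk, hRk⟩ := hrooted k hk
    have h1 := pvRoot_det p' j r rj hRj' (hpres j rj hj hRj)
    have h2 := pvRoot_det p' k r rk hRk' (hpres k rk hk hRk)
    exact ⟨rj, by rw [← h1]; exact h1 ▸ hRj, by rw [← h1, h2]; exact hRk⟩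
  · rintro ⟨r, hRj, hRk⟩
    exact ⟨r, hpres j r hj hRj, hpres k r hk hRk⟩

theorem pvAt_map (comp : List Int) (f : Int → Int) (j : Nat) (hj : j < comp.length) :
    pvAt (comp.map f) j = f (pvAt comp j) := by
  unfold pvAt
  rw [List.getD_eq_getElem?_getD, List.getD_eq_getElem?_getD,
    List.getElem?_map, List.getElem?_eq_getElem hj]
  rfl

theorem pvSigma_eq_iff {α : Type} [DecidableEq α] (c d x y : α) (hcd : c ≠ d) :
    ((if x = c then d else x) = (if y = c then d else y)) ↔
      (x = y ∨ (x = c ∧ y = d) ∨ (x = d ∧ y = c)) := by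
  by_cases hx : x = c <;> by_cases hy : y = c <;> simp [hx, hy] <;> aesop

theorem pvAcc_step (m : Nat) (p rk comp : List Int) (u v w : Int) (tc : Int)
    (eu : List (Int × Int × Int)) (hm : 2 ≤ m) (hInv : pvINV m p comp)
    (hu : pvInRm m u) (hv : pvInRm m v) :
    ∃ p' rk', pvAccA (p, rk, tc, eu) u v w =
        (p', rk', (if (pvMergeB comp u v).2 then tc + w else tc),
         (if (pvMergeB comp u v).2 then eu ++ [(u, v, w)] else eu))
      ∧ pvINV m p' (pvMergeB comp u v).1 := by
  obtain ⟨hlen, hr, hrooted, hclen, hiff⟩ := hInv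
  have hnum : pvNrm m u < m := pvNrm_lt m u hu.1 hu.2
  have hnvm : pvNrm m v < m := pvNrm_lt m v hv.1 hv.2
  obtain ⟨rx, hRx⟩ := hrooted (pvNrm m u) hnum
  obtain ⟨ry, hRy⟩ := hrooted (pvNrm m v) hnvm
  have hcu : PySem.List.pyGetD comp u 0 = pvAt comp (pvNrm m u) := by
    rw [pyGetD_nrm comp u 0 (by rw [hclen]; exact hu.1) (by rw [hclen]; exact hu.2), hclen]; rfl
  have hcv : PySem.List.pyGetD comp v 0 = pvAt comp (pvNrm m v) := by
    rw [pyGetD_nrm comp v 0 (by rw [hclen]; exact hv.1) (by rw [hclen]; exact hv.2), hclen]; rfl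
  have hsame : ∀ j k, j < m → k < m → ∀ sj sk, pvRoot p j sj → pvRoot p k sk →
      (sj = sk ↔ pvAt comp j = pvAt comp k) := by
    intro j k hj hk sj sk h1 h2
    rw [← hiff j k hj hk]
    constructor
    · intro h; cases h; exact ⟨sj, h1, h2⟩
    · rintro ⟨r, hr1, hr2⟩
      have e1 := pvRoot_det p j sj r h1 hr1
      have e2 := pvRoot_det p k sk r h2 hr2
      omega
  have hkey : (rx = ry) ↔ (pvAt comp (pvNrm m u) = pvAt comp (pvNrm m v)) :=
    hsame _ _ hnum hnvm rx ry hRx hRy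
  obtain ⟨p1, hf1, hlen1, hr1, hpres1⟩ := pvFind_spec m p u rx hlen hr hm hu hRx
  obtain ⟨p2, hf2, hlen2, hr2, hpres2⟩ :=
    pvFind_spec m p1 v ry hlen1 hr1 hm hv (hpres1 _ _ hnvm hRy)
  have hpres12 : pvPres m p p2 := fun j s hj h => hpres2 j s hj (hpres1 j s hj h)
  unfold pvAccA
  simp only []
  rw [hlen, hf1]
  simp only []
  rw [hlen1, hf2]
  simp only []
  by_cases hrr : rx = ry
  · have hc : pvAt comp (pvNrm m u) = pvAt comp (pvNrm m v) := hkey.mp hrr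
    have hmb : pvMergeB comp u v = (comp, false) := by
      unfold pvMergeB
      rw [hcu, hcv, if_pos hc]
    rw [if_neg (by simp [hrr]), hmb]
    refine ⟨p2, rk, ?_, ?_⟩
    · rfl
    exact pvINV_pres m p p2 comp ⟨hlen, hr, hrooted, hclen, hiff⟩ hlen2 hr2 hpres12
  · have hc : pvAt comp (pvNrm m u) ≠ pvAt comp (pvNrm m v) := fun h => hrr (hkey.mpr h)
    have hmb : pvMergeB comp u v =
        (comp.map (fun c => if c = pvAt comp (pvNrm m v) then pvAt comp (pvNrm m u) else c), true) := by
      unfold pvMergeB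
      rw [hcu, hcv, if_neg hc]
    obtain ⟨p3, hun, hlen3, hr3, hcase⟩ := pvUnion_spec m p2 rk u v rx ry hlen2 hr2 hm hu hv
      (hpres12 _ _ hnum hRx) (hpres12 _ _ hnvm hRy)
    rcases hcase with ⟨heq, _⟩ | ⟨_, c, d, hcd, hmap0⟩
    · exact absurd heq hrr
    have hmap : ∀ j s, j < m → pvRoot p j s → pvRoot p3 j (if s = c then d else s) :=
      fun j s hj h => hmap0 j s hj (hpres12 j s hj h)
    have hcdne : c ≠ d := by
      intro h0
      rcases hcd with h | h <;> (obtain ⟨h1, h2⟩ := Prod.mk.injEq .. ▸ h) <;> omega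
    rw [if_pos (by simpa using fun h => hrr (by exact_mod_cast h)), hmb]
    refine ⟨p3, (pvUnion p2 rk u v).2.1, ?_, ?_⟩
    · rw [hun]; rfl
    refine ⟨hlen3, hr3, fun k hk => ⟨_, hmap k _ hk (hrooted k hk).choose_spec⟩, by rw [List.length_map]; exact hclen, ?_⟩
    intro j k hj hk
    obtain ⟨sj, hsj⟩ := hrooted j hj
    obtain ⟨sk, hsk⟩ := hrooted k hk
    have hRj' := hmap j sj hj hsj
    have hRk' := hmap k sk hk hsk
    have hL : (∃ r, pvRoot p3 j r ∧ pvRoot p3 k r) ↔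
        (if sj = c then d else sj) = (if sk = c then d else sk) := by
      constructor
      · rintro ⟨r, h1, h2⟩
        have e1 := pvRoot_det p3 j _ r hRj' h1
        have e2 := pvRoot_det p3 k _ r hRk' h2
        omega
      · intro h; exact ⟨_, hRj', h ▸ hRk'⟩
    have hRmap : ∀ x, x < comp.length → pvAt (comp.map (fun c0 =>
        if c0 = pvAt comp (pvNrm m v) then pvAt comp (pvNrm m u) else c0)) x
        = (if pvAt comp x = pvAt comp (pvNrm m v) then pvAt comp (pvNrm m u) else pvAt comp x) :=
      fun x hx => pvAt_map comp _ x hx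
    rw [hL, hRmap j (by omega), hRmap k (by omega)]
    rw [pvSigma_eq_iff c d sj sk hcdne,
      pvSigma_eq_iff (pvAt comp (pvNrm m v)) (pvAt comp (pvNrm m u)) _ _ (fun h => hc h.symm)]
    have b1 : sj = sk ↔ pvAt comp j = pvAt comp k := hsame j k hj hk sj sk hsj hsk
    have bju : sj = rx ↔ pvAt comp j = pvAt comp (pvNrm m u) := hsame j _ hj hnum sj rx hsj hRx
    have bjv : sj = ry ↔ pvAt comp j = pvAt comp (pvNrm m v) := hsame j _ hj hnvm sj ry hsj hRy
    have bku : sk = rx ↔ pvAt comp k = pvAt comp (pvNrm m u) := hsame k _ hk hnum sk rx hsk hRx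
    have bkv : sk = ry ↔ pvAt comp k = pvAt comp (pvNrm m v) := hsame k _ hk hnvm sk ry hsk hRy
    rcases hcd with h | h <;> obtain ⟨h1, h2⟩ := Prod.mk.injEq .. ▸ h
    · rw [h1, h2, b1, bju, bjv, bku, bkv]
      exact or_congr Iff.rfl or_comm
    · rw [h1, h2, b1, bjv, bju, bkv, bku]

theorem pvFold_spec (m : Nat) (ee : Option (Int × Int × Int)) (hm : 2 ≤ m) :
    ∀ (edges : List (Int × Int × Int)) (p rk comp : List Int) (tc : Int)
      (eu : List (Int × Int × Int)),
    pvINV m p comp →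
    (∀ e ∈ edges, some (e.1, e.2.1, e.2.2) = ee ∨ some (e.2.1, e.1, e.2.2) = ee ∨
      (pvInRm m e.1 ∧ pvInRm m e.2.1)) →
    ∃ p' rk' comp' tc' eu',
      edges.foldl (pvStepA ee) (p, rk, tc, eu) = (p', rk', tc', eu') ∧
      edges.foldl (pvStepB ee) (comp, tc, eu) = (comp', tc', eu') ∧ pvINV m p' comp' := by
  intro edges
  induction edges with
  | nil => intro p rk comp tc eu hInv _; exact ⟨p, rk, comp, tc, eu, rfl, rfl, hInv⟩
  | cons e es ih =>
    intro p rk comp tc eu hInv hcond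
    rw [List.foldl_cons, List.foldl_cons]
    rcases hcond e List.mem_cons_self with hex | hex | ⟨hu, hv⟩
    · rw [show pvStepA ee (p, rk, tc, eu) e = (p, rk, tc, eu) by unfold pvStepA; rw [if_pos hex],
        show pvStepB ee (comp, tc, eu) e = (comp, tc, eu) by unfold pvStepB; rw [if_pos (Or.inl hex)]]
      exact ih p rk comp tc eu hInv (fun e' he' => hcond e' (List.mem_cons_of_mem _ he'))
    · have hA : pvStepA ee (p, rk, tc, eu) e = (p, rk, tc, eu) := by
        unfold pvStepA
        by_cases h1 : some (e.1, e.2.1, e.2.2) = ee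
        · rw [if_pos h1]
        · rw [if_neg h1, if_pos hex]
      rw [hA, show pvStepB ee (comp, tc, eu) e = (comp, tc, eu) by
        unfold pvStepB; rw [if_pos (Or.inr hex)]]
      exact ih p rk comp tc eu hInv (fun e' he' => hcond e' (List.mem_cons_of_mem _ he'))
    · by_cases h1 : some (e.1, e.2.1, e.2.2) = ee
      · rw [show pvStepA ee (p, rk, tc, eu) e = (p, rk, tc, eu) by unfold pvStepA; rw [if_pos h1],
          show pvStepB ee (comp, tc, eu) e = (comp, tc, eu) by unfold pvStepB; rw [if_pos (Or.inl h1)]]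
        exact ih p rk comp tc eu hInv (fun e' he' => hcond e' (List.mem_cons_of_mem _ he'))
      · by_cases h2 : some (e.2.1, e.1, e.2.2) = ee
        · rw [show pvStepA ee (p, rk, tc, eu) e = (p, rk, tc, eu) by
              unfold pvStepA; rw [if_neg h1, if_pos h2],
            show pvStepB ee (comp, tc, eu) e = (comp, tc, eu) by
              unfold pvStepB; rw [if_pos (Or.inr h2)]]
          exact ih p rk comp tc eu hInv (fun e' he' => hcond e' (List.mem_cons_of_mem _ he'))
        · obtain ⟨p1, rk1, hstep, hInv1⟩ := pvAcc_step m p rk comp e.1 e.2.1 e.2.2 tc eu hm hInv hu hv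
          have hA : pvStepA ee (p, rk, tc, eu) e =
              (p1, rk1, (if (pvMergeB comp e.1 e.2.1).2 then tc + e.2.2 else tc),
               (if (pvMergeB comp e.1 e.2.1).2 then eu ++ [(e.1, e.2.1, e.2.2)] else eu)) := by
            unfold pvStepA
            rw [if_neg h1, if_neg h2]
            exact hstep
          have hB : pvStepB ee (comp, tc, eu) e =
              ((pvMergeB comp e.1 e.2.1).1,
               (if (pvMergeB comp e.1 e.2.1).2 then tc + e.2.2 else tc),
               (if (pvMergeB comp e.1 e.2.1).2 then eu ++ [(e.1, e.2.1, e.2.2)] else eu)) := by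
            unfold pvStepB
            rw [if_neg (by rintro (h | h) <;> [exact h1 h; exact h2 h])]
            by_cases hmg : (pvMergeB comp e.1 e.2.1).2
            · rw [if_pos hmg, if_pos hmg, if_pos hmg]
            · rw [if_neg hmg, if_neg hmg, if_neg hmg]
          rw [hA, hB]
          exact ih p1 rk1 (pvMergeB comp e.1 e.2.1).1 _ _ hInv1
            (fun e' he' => hcond e' (List.mem_cons_of_mem _ he'))

-- a fold whose flag is already true never changes
theorem pvCheckFold_true (L : List Int) (rr : Int) (p : List Int) :
    (L.foldl (fun acc i =>
      if acc.2 then acc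
      else
        let fi := pvFind acc.1.length acc.1 i
        (fi.1, decide (fi.2 ≠ rr))) (p, true)) = (p, true) := by
  induction L generalizing p with
  | nil => rfl
  | cons i L ih => rw [List.foldl_cons, if_pos rfl]; exact ih p

theorem pvCheckFold_spec (m : Nat) (comp : List Int) (r1 : Nat) (hm : 2 ≤ m) :
    ∀ (L : List Int), (∀ i ∈ L, 0 ≤ i ∧ i < (m:Int)) →
    ∀ (p : List Int), pvINV m p comp → pvRoot p 1 r1 →
    (L.foldl (fun acc i =>
      if acc.2 then acc
      else
        let fi := pvFind acc.1.length acc.1 i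
        (fi.1, decide (fi.2 ≠ (r1:Int)))) (p, false)).2
      = L.any (fun i => PySem.List.pyGetD comp i 0 != PySem.List.pyGetD comp 1 0) := by
  intro L
  induction L with
  | nil => intro _ p _ _; rfl
  | cons i L ih =>
    intro hmem p hInv hR1
    obtain ⟨hlen, hr, hrooted, hclen, hiff⟩ := hInv
    obtain ⟨hi0, him⟩ := hmem i List.mem_cons_self
    have hin : pvInRm m i := ⟨by omega, him⟩
    have hnim : pvNrm m i < m := pvNrm_lt m i hin.1 hin.2
    obtain ⟨ri, hRi⟩ := hrooted (pvNrm m i) hnim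
    obtain ⟨pi, hfi, hleni, hri, hpresi⟩ := pvFind_spec m p i ri hlen hr hm hin hRi
    have h1m : (1:Nat) < m := by omega
    have hbridge : (ri = r1) ↔ (PySem.List.pyGetD comp i 0 = PySem.List.pyGetD comp 1 0) := by
      have hcu : PySem.List.pyGetD comp i 0 = pvAt comp (pvNrm m i) := by
        rw [pyGetD_nrm comp i 0 (by rw [hclen]; exact hin.1) (by rw [hclen]; exact hin.2), hclen]
        rfl
      have hc1 : PySem.List.pyGetD comp 1 0 = pvAt comp 1 := by
        rw [pyGetD_nrm comp 1 0 (by rw [hclen]; omega) (by rw [hclen]; exact_mod_cast h1m)]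
        rw [hclen]
        have : pvNrm m 1 = 1 := by unfold pvNrm; simp
        rw [this]
        rfl
      rw [hcu, hc1, ← hiff _ 1 hnim h1m]
      constructor
      · intro h; exact ⟨r1, h ▸ hRi, hR1⟩
      · rintro ⟨r, ha, hb⟩
        have e1 := pvRoot_det p _ ri r hRi ha
        have e2 := pvRoot_det p 1 r1 r hR1 hb
        omega
    rw [List.foldl_cons, if_neg (by simp), List.any_cons]
    simp only []
    rw [hlen, hfi]
    simp only []
    by_cases hne : ri = r1
    · rw [show (decide (¬((ri:Nat):Int) = (r1:Nat))) = false by simp [hne]]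
      rw [show (PySem.List.pyGetD comp i 0 != PySem.List.pyGetD comp 1 0) = false by
        simp [bne]; exact hbridge.mp hne]
      rw [Bool.false_or]
      exact ih (fun i' hi' => hmem i' (List.mem_cons_of_mem _ hi')) pi
        ⟨hleni, hri, fun k hk => (hrooted k hk).imp (fun r h => hpresi k r hk h), hclen, by
          intro j k hj hk
          rw [← hiff j k hj hk]
          constructor
          · rintro ⟨r, ha, hb⟩
            obtain ⟨rj, hRj⟩ := hrooted j hj
            obtain ⟨rk, hRk⟩ := hrooted k hk
            have e1 := pvRoot_det pi j r rj ha (hpresi j rj hj hRj)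
            have e2 := pvRoot_det pi k r rk hb (hpresi k rk hk hRk)
            exact ⟨rj, hRj, by rw [show rj = rk by omega]; exact hRk⟩
          · rintro ⟨r, ha, hb⟩
            exact ⟨r, hpresi j r hj ha, hpresi k r hk hb⟩⟩
        (hpresi 1 r1 h1m hR1)
    · rw [show (decide (¬((ri:Nat):Int) = (r1:Nat))) = true by simp; exact_mod_cast hne]
      rw [show (PySem.List.pyGetD comp i 0 != PySem.List.pyGetD comp 1 0) = true by
        simp [bne]; exact fun h => hne (hbridge.mpr h)]
      rw [Bool.true_or]
      exact congrArg Prod.snd (pvCheckFold_true L (r1:Int) pi)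

theorem pvInit (m : Nat) (n : Int) (hmn : (m:Int) = n + 1) (hm : 2 ≤ m) :
    pvINV m (PySem.List.pyRange 0 (n+1) 1) (PySem.List.pyRange 0 (n+1) 1) := by
  have hlen : (PySem.List.pyRange 0 (n+1) 1).length = m := by
    rw [PySem.List.length_pyRange_one]; omega
  have hat : ∀ k, k < m → pvAt (PySem.List.pyRange 0 (n+1) 1) k = (k:Int) := by
    intro k hk
    unfold pvAt
    rw [List.getD_eq_getElem?_getD, List.getElem?_eq_getElem (by rw [hlen]; exact hk)]
    rw [PySem.List.getElem_pyRange_one]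
    simp
  have hself : ∀ k, k < m → pvRoot (PySem.List.pyRange 0 (n+1) 1) k k :=
    fun k hk => pvRoot_self _ k (hat k hk)
  refine ⟨hlen, fun k hk => by rw [hat k hk]; omega, fun k hk => ⟨k, hself k hk⟩, hlen, ?_⟩
  intro j k hj hk
  rw [hat j hj, hat k hk]
  constructor
  · rintro ⟨r, ha, hb⟩
    have e1 := pvRoot_det _ j r j ha (hself j hj)
    have e2 := pvRoot_det _ k r k hb (hself k hk)
    omega
  · intro h
    have : j = k := by omega
    subst this
    exact ⟨j, hself j hj, hself j hj⟩


theorem pvTail (m : Nat) (n : Int) (hmn : (m:Int) = n + 1) (hm : 2 ≤ m)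
    (edges : List (Int × Int × Int)) (ee : Option (Int × Int × Int))
    (p1 rk1 comp1 : List Int) (tc1 : Int) (eu1 : List (Int × Int × Int))
    (hInv1 : pvINV m p1 comp1)
    (hedges : ∀ e ∈ edges, some (e.1, e.2.1, e.2.2) = ee ∨ some (e.2.1, e.1, e.2.2) = ee ∨
      (pvInRm m e.1 ∧ pvInRm m e.2.1)) :
    (let st2 := edges.foldl (pvStepA ee) (p1, rk1, tc1, eu1)
     let fr := pvFind st2.1.length st2.1 1
     let chk := (PySem.List.pyRange 2 (n+1) 1).foldl
       (fun acc i =>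
         if acc.2 then acc
         else
           let fi := pvFind acc.1.length acc.1 i
           (fi.1, decide (fi.2 ≠ fr.2))) (fr.1, false)
     if chk.2 then ((none, none) : Option Int × Option (List (Int × Int × Int)))
     else (some st2.2.2.1, some st2.2.2.2)) =
    (let st2 := edges.foldl (pvStepB ee) (comp1, tc1, eu1)
     if (PySem.List.pyRange 2 (n+1) 1).any
         (fun i => PySem.List.pyGetD st2.1 i 0 != PySem.List.pyGetD st2.1 1 0)
     then ((none, none) : Option Int × Option (List (Int × Int × Int)))
     else (some st2.2.1, some st2.2.2)) := by
  obtain ⟨p2, rk2, comp2, tc2, eu2, hA2, hB2, hInv2⟩ :=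
    pvFold_spec m ee hm edges p1 rk1 comp1 tc1 eu1 hInv1 hedges
  obtain ⟨hlen2, hr2, hrooted2, hclen2, hiff2⟩ := hInv2
  obtain ⟨r1, hR1⟩ := hrooted2 1 (by omega)
  have h1in : pvInRm m (1:Int) := ⟨by omega, by omega⟩
  have hnrm1 : pvNrm m (1:Int) = 1 := by unfold pvNrm; simp
  obtain ⟨pf, hfr, hlenf, hrf, hpresf⟩ :=
    pvFind_spec m p2 1 r1 hlen2 hr2 hm h1in (hnrm1 ▸ hR1)
  have hInvf : pvINV m pf comp2 :=
    pvINV_pres m p2 pf comp2 ⟨hlen2, hr2, hrooted2, hclen2, hiff2⟩ hlenf hrf hpresf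
  have hchk := pvCheckFold_spec m comp2 r1 hm (PySem.List.pyRange 2 (n+1) 1)
    (by
      intro i hi
      rw [PySem.List.mem_pyRange_one] at hi
      constructor <;> omega)
    pf hInvf (hpresf 1 r1 (by omega) hR1)
  simp only []
  rw [hA2, hB2]
  simp only []
  rw [hlen2, hfr]
  simp only []
  rw [hchk]

theorem pvMain (n : Int) (edges : List (Int × Int × Int)) (ie ee : Option (Int × Int × Int))
    (hn : 1 ≤ n)
    (hie : ∀ t, ie = some t → ((-(n+1) ≤ t.1 ∧ t.1 ≤ n) ∧ (-(n+1) ≤ t.2.1 ∧ t.2.1 ≤ n)))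
    (hedges : ∀ e ∈ edges, some (e.1, e.2.1, e.2.2) = ee ∨ some (e.2.1, e.1, e.2.2) = ee ∨
      ((-(n+1) ≤ e.1 ∧ e.1 ≤ n) ∧ (-(n+1) ≤ e.2.1 ∧ e.2.1 ≤ n))) :
    kruskal n edges ie ee = kruskal_alt n edges ie ee := by
  have hmn : (((n+1).toNat : Nat) : Int) = n + 1 := by omega
  set m := (n+1).toNat with hmdef
  have hm : 2 ≤ m := by omega
  have hInv0 : pvINV m (PySem.List.pyRange 0 (n+1) 1) (PySem.List.pyRange 0 (n+1) 1) :=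
    pvInit m n hmn hm
  have hinr : ∀ x : Int, -(n+1) ≤ x → x ≤ n → pvInRm m x := by
    intro x h1 h2; exact ⟨by omega, by omega⟩
  have hedges' : ∀ e ∈ edges, some (e.1, e.2.1, e.2.2) = ee ∨ some (e.2.1, e.1, e.2.2) = ee ∨
      (pvInRm m e.1 ∧ pvInRm m e.2.1) := by
    intro e he
    rcases hedges e he with h | h | ⟨⟨ha1, ha2⟩, ⟨hb1, hb2⟩⟩
    · exact Or.inl h
    · exact Or.inr (Or.inl h)
    · exact Or.inr (Or.inr ⟨hinr e.1 ha1 ha2, hinr e.2.1 hb1 hb2⟩)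
  cases ie with
  | none =>
    unfold kruskal kruskal_alt
    exact pvTail m n hmn hm edges ee _ _ _ 0 [] hInv0 hedges'
  | some t =>
    obtain ⟨⟨hu1, hu2⟩, ⟨hv1, hv2⟩⟩ := hie t rfl
    obtain ⟨p1, rk1, hstep, hInv1⟩ := pvAcc_step m (PySem.List.pyRange 0 (n+1) 1)
      (List.replicate (n+1).toNat 1) (PySem.List.pyRange 0 (n+1) 1) t.1 t.2.1 t.2.2 0 [] hm
      hInv0 (hinr t.1 hu1 hu2) (hinr t.2.1 hv1 hv2)
    unfold kruskal kruskal_alt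
    simp only []
    by_cases hmg : (pvMergeB (PySem.List.pyRange 0 (n+1) 1) t.1 t.2.1).2
    · simp only [hstep, hmg, if_true, zero_add, List.nil_append]
      exact pvTail m n hmn hm edges ee p1 rk1 _ t.2.2 [(t.1, t.2.1, t.2.2)] hInv1 hedges'
    · simp only [hstep, hmg, Bool.false_eq_true, if_false, zero_add, List.nil_append]
      exact pvTail m n hmn hm edges ee p1 rk1 _ 0 [] hInv1 hedges'


-- ===== VERDICT (by name: the statement is the Claim_ definition above) =====
theorem kruskal_spec : Claim_equal_kruskal := by
  intro n edges include_edge exclude_edge _ hpre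
  obtain ⟨hn, hie, hedges⟩ := hpre
  unfold Spec_kruskal
  refine pvMain n edges include_edge exclude_edge hn ?_ hedges
  intro t ht
  rw [ht] at hie
  exact hie
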